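-- pv_equiv track=rewrite | github.com/yingliufengpeng/algorithm | zhengwei/05 字符串专题/19 字符串应用_尺取法的应用.py | checkexact
-- ===== SOURCE A (Python) =====
-- def checkexact(w, i, j):
--     c1 = c2 = c3 = 0
--
--     for e in w[i: j + 1]:
--
--         if e == 'h':
--             c1 += 1
--
--         elif e == 'i':
--             c2 += 1
--
--         elif e == 'o':
--             c3 += 1
--
--         else:
--             pass
--
--     return c1 == 2 and c2 == 1 and c3 == 1
-- ===== SOURCE B (Python) =====
-- def checkexact(w, i, j):
--     return sorted(c for c in w[i: j + 1] if c in ('h', 'i', 'o')) == ['h', 'h', 'i', 'o']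
-- ===== Notes on version B (the rewrite author's own statement) =====
-- stated objective: alternative
-- what changed: Instead of counting characters, B filters the slice down to its h/i/o characters, sorts them, and compares the sorted list against the canonical multiset ['h','h','i','o'].
import Mathlib
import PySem

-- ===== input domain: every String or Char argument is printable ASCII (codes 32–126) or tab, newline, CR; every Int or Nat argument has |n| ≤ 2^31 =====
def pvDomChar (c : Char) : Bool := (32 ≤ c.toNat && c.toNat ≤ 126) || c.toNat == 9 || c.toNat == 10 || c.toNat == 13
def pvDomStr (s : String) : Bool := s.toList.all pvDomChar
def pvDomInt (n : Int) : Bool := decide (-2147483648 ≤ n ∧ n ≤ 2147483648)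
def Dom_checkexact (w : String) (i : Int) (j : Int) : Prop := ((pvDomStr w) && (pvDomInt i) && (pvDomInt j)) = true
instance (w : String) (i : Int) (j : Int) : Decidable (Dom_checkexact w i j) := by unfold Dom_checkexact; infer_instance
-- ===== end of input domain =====

-- B replaces A's single-pass three-counter branch loop by filtering the slice down to its
-- h/i/o characters, sorting them, and comparing the result to the canonical list
-- ['h','h','i','o'] (objective: alternative; no mutation, return value only).

-- ===== PORT A =====
-- the for-loop over w[i:j+1] with counters c1, c2, c3, transliterated as a foldl over the same slice
def checkexact (w : String) (i : Int) (j : Int) : Bool :=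
  let cs : Int × Int × Int :=
    (PySem.List.slice w.toList (some i) (some (j + 1))).foldl
      (fun c e =>
        if e = 'h' then (c.1 + 1, c.2.1, c.2.2)
        else if e = 'i' then (c.1, c.2.1 + 1, c.2.2)
        else if e = 'o' then (c.1, c.2.1, c.2.2 + 1)
        else c)
      (0, 0, 0)
  cs.1 == 2 && cs.2.1 == 1 && cs.2.2 == 1

-- ===== PORT B =====
def checkexact_alt (w : String) (i : Int) (j : Int) : Bool :=
  PySem.List.sorted
      ((PySem.List.slice w.toList (some i) (some (j + 1))).filter
        (fun c => c == 'h' || c == 'i' || c == 'o'))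
      (fun x => x) false
    == ['h', 'h', 'i', 'o']

-- ===== PRECONDITION & SPEC =====
def Spec_checkexact (w : String) (i : Int) (j : Int) (out : Bool) : Prop := out = checkexact_alt w i j
instance (w : String) (i : Int) (j : Int) (out : Bool) : Decidable (Spec_checkexact w i j out) := by unfold Spec_checkexact; infer_instance

-- ===== CLAIM (what is proved, stated in full; the proofs are below) =====
def Claim_equal_checkexact : Prop := ∀ (w : String) (i : Int) (j : Int), Dom_checkexact w i j → Spec_checkexact w i j (checkexact w i j)

-- ===== LEMMAS AND PROOFS =====
theorem checkexact_fold_eq (l : List Char) (c1 c2 c3 : Int) :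
    l.foldl
      (fun (c : Int × Int × Int) e =>
        if e = 'h' then (c.1 + 1, c.2.1, c.2.2)
        else if e = 'i' then (c.1, c.2.1 + 1, c.2.2)
        else if e = 'o' then (c.1, c.2.1, c.2.2 + 1)
        else c)
      (c1, c2, c3)
    = (c1 + l.count 'h', c2 + l.count 'i', c3 + l.count 'o') := by
  induction l generalizing c1 c2 c3 with
  | nil => simp
  | cons e rest ih =>
    by_cases h1 : e = 'h'
    · simp [h1, ih]; ring
    · by_cases h2 : e = 'i'
      · simp [h2, ih]; ring
      · by_cases h3 : e = 'o'
        · simp [h3, ih]; ring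
        · simp [h1, h2, h3, ih]

theorem checkexact_filter_perm_iff (l : List Char) :
    (l.filter (fun c => c == 'h' || c == 'i' || c == 'o')).Perm ['h', 'h', 'i', 'o'] ↔
      (l.count 'h' = 2 ∧ l.count 'i' = 1 ∧ l.count 'o' = 1) := by
  rw [List.perm_iff_count]
  constructor
  · intro h
    refine ⟨?_, ?_, ?_⟩
    · have := h 'h'; simpa [List.count_filter] using this
    · have := h 'i'; simpa [List.count_filter] using this
    · have := h 'o'; simpa [List.count_filter] using this
  · rintro ⟨h1, h2, h3⟩ a
    by_cases ha : a = 'h'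
    · subst ha; simpa [List.count_filter] using h1
    · by_cases hb : a = 'i'
      · subst hb; simpa [List.count_filter] using h2
      · by_cases hc : a = 'o'
        · subst hc; simpa [List.count_filter] using h3
        · have : a ∉ l.filter (fun c => c == 'h' || c == 'i' || c == 'o') := by
            simp [List.mem_filter, ha, hb, hc]
          simp [List.count_eq_zero_of_not_mem this, eq_comm, ha, hb, hc]

theorem checkexact_sorted_iff (l : List Char) :
    (PySem.List.sorted (l.filter (fun c => c == 'h' || c == 'i' || c == 'o')) (fun x => x) false
        = ['h', 'h', 'i', 'o']) ↔
      (l.count 'h' = 2 ∧ l.count 'i' = 1 ∧ l.count 'o' = 1) := by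
  rw [← checkexact_filter_perm_iff]
  constructor
  · intro h
    have hp := PySem.List.sorted_perm (l.filter (fun c => c == 'h' || c == 'i' || c == 'o')) (fun x : Char => x) false
    rw [h] at hp
    exact hp.symm
  · intro h
    exact PySem.List.sorted_id_eq_of_perm_of_pairwise _ _ h.symm (by decide)

-- ===== VERDICT (by name: the statement is the Claim_ definition above) =====
theorem checkexact_spec : Claim_equal_checkexact := by
  intro w i j _
  unfold Spec_checkexact checkexact checkexact_alt
  simp only [checkexact_fold_eq, zero_add]
  rw [Bool.eq_iff_iff]
  simp only [beq_iff_eq, Bool.and_eq_true]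
  rw [checkexact_sorted_iff]
  omega
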